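-- pv_equiv track=rewrite | github.com/cjkangme/BaekjoonHub | 백준/Silver/17252. 삼삼한 수/삼삼한 수.py | bit_to_num
-- ===== SOURCE A (Python) =====
-- def bit_to_num(bits):
--     digit = 1
--     num = 0
--
--     while bits:
--         if bits & 1:
--             num += digit
--         bits = bits >> 1
--         digit *= 3
--
--     return num
-- ===== SOURCE B (Python) =====
-- def bit_to_num(bits):
--     num = 0
--     for ch in bin(bits)[2:]:
--         num = num * 3 + (1 if ch == '1' else 0)
--     return num
-- ===== Notes on version B (the rewrite author's own statement) =====
-- stated objective: idiomatic
-- what changed: B folds the binary digit string bin(bits)[2:] MSB-first with Horner multiply-by-3 accumulation instead of A's LSB-first loop that maintains an explicit power-of-3 digit.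
-- outside the precondition, e.g. on bit_to_num(-1): A does not finish within the time limit, B returns 1
import Mathlib
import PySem

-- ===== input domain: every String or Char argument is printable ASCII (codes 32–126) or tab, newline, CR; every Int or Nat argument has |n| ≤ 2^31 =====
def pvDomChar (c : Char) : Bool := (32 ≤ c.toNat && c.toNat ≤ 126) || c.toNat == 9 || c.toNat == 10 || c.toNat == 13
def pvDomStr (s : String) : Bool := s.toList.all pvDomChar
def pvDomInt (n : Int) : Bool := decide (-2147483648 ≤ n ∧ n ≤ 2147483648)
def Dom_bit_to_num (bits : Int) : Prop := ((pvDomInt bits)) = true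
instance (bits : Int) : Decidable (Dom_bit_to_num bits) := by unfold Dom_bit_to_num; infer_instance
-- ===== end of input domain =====

-- B folds the binary digit string MSB-first with Horner multiply-by-3 accumulation instead of
-- A's LSB-first loop with an explicit power-of-3 digit (objective: idiomatic; same cost).


-- ===== PORT A =====
-- while bits: if bits & 1: num += digit; bits >>= 1; digit *= 3
-- (for bits < 0 the Python loop never terminates — excluded by Pre_; we return num there)
def bit_to_num_go (bits digit num : Int) : Int :=
  if 0 < bits then
    bit_to_num_go (bits >>> (1 : Nat)) (digit * 3)
      (if PySem.Int.band bits 1 ≠ 0 then num + digit else num)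
  else num
termination_by bits.toNat
decreasing_by
  rename_i h
  have : bits >>> (1 : Nat) = bits / 2 := by simp [Int.shiftRight_eq_div_pow]
  omega

def bit_to_num (bits : Int) : Int := bit_to_num_go bits 1 0

-- ===== PORT B =====
-- bin(bits)[2:] as a list of binary digits, most significant first ('0' ↦ 0, '1' ↦ 1)
def binDigits (n : Nat) : List Int :=
  if n = 0 then [] else binDigits (n / 2) ++ [((n % 2 : Nat) : Int)]

def bit_to_num_alt (bits : Int) : Int :=
  let ds := if bits = 0 then [(0 : Int)] else binDigits bits.toNat
  ds.foldl (fun num d => num * 3 + d) 0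

-- ===== PRECONDITION & SPEC =====
-- Pre_ excludes negative bits, on which Python A loops forever (it never returns there).
def Pre_bit_to_num (bits : Int) : Prop := 0 ≤ bits
instance (bits : Int) : Decidable (Pre_bit_to_num bits) := by unfold Pre_bit_to_num; infer_instance
def pvWitness_bit_to_num : Int := 11

def Spec_bit_to_num (bits : Int) (out : Int) : Prop := out = bit_to_num_alt bits
instance (bits : Int) (out : Int) : Decidable (Spec_bit_to_num bits out) := by unfold Spec_bit_to_num; infer_instance

-- ===== CLAIM (what is proved, stated in full; the proofs are below) =====
def Claim_equal_bit_to_num : Prop := ∀ (bits : Int), Dom_bit_to_num bits → Pre_bit_to_num bits → Spec_bit_to_num bits (bit_to_num bits)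

-- ===== LEMMAS AND PROOFS =====
-- reference value: the base-3 reinterpretation of n's binary digits
def base3val (n : Nat) : Int :=
  if n = 0 then 0 else ((n % 2 : Nat) : Int) + 3 * base3val (n / 2)

theorem go_eq (n : Nat) : ∀ digit num : Int,
    bit_to_num_go (n : Int) digit num = num + digit * base3val n := by
  induction n using Nat.strong_induction_on with
  | _ n ih =>
    intro digit num
    rw [bit_to_num_go, base3val]
    by_cases h0 : n = 0
    · simp [h0]
    · have hpos : 0 < (n : Int) := by exact_mod_cast Nat.pos_of_ne_zero h0
      have hshift : (n : Int) >>> (1 : Nat) = ((n / 2 : Nat) : Int) := by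
        simp [Int.shiftRight_eq_div_pow]
      have hband : PySem.Int.band (n : Int) 1 = ((n % 2 : Nat) : Int) := by
        rw [PySem.Int.band_one]
        exact_mod_cast PySem.Int.mod_natCast n 2
      rw [if_pos hpos, hshift, ih (n / 2) (by omega)]
      rw [if_neg h0, hband]
      by_cases hb : n % 2 = 0
      · simp [hb]; ring
      · have h1 : n % 2 = 1 := by omega
        simp [h1]; ring

theorem fold_binDigits (n : Nat) :
    (binDigits n).foldl (fun num d => num * 3 + d) 0 = base3val n := by
  induction n using Nat.strong_induction_on with
  | _ n ih =>
    rw [binDigits, base3val]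
    by_cases h0 : n = 0
    · simp [h0]
    · rw [if_neg h0, if_neg h0, List.foldl_append, ih (n / 2) (by omega)]
      simp; ring

-- ===== VERDICT (by name: the statement is the Claim_ definition above) =====
theorem bit_to_num_spec : Claim_equal_bit_to_num := by
  intro bits _ hpre
  unfold Spec_bit_to_num bit_to_num bit_to_num_alt
  obtain ⟨n, rfl⟩ : ∃ n : Nat, bits = (n : Int) := ⟨bits.toNat, (Int.toNat_of_nonneg hpre).symm⟩
  rw [go_eq]
  by_cases h0 : n = 0
  · simp [h0, base3val]
  · have : (n : Int) ≠ 0 := by exact_mod_cast h0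
    simp only [this, if_false, Int.toNat_natCast, fold_binDigits]
    ring
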